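-- pv_equiv track=rewrite | github.com/ayukyo/alltoolkit | Python/iter_utils/mod.py | triplewise
-- ===== SOURCE A (Python) =====
-- from typing import (
--     TypeVar, Iterable, Iterator, List, Tuple, Optional, Callable,
--     Generator, Any, Union, Sequence, overload
-- )
--
-- T = TypeVar('T')
--
-- def triplewise(iterable: Iterable[T]) -> Generator[Tuple[T, T, T], None, None]:
--     """
--     Generate triples of consecutive elements.
--
--     Args:
--         iterable: The iterable to triple
--
--     Yields:
--         Tuples of three consecutive elements
--
--     Examples:
--         >>> list(triplewise([1, 2, 3, 4, 5]))
--         [(1, 2, 3), (2, 3, 4), (3, 4, 5)]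
--     """
--     it = iter(iterable)
--     try:
--         a = next(it)
--         b = next(it)
--         c = next(it)
--         yield (a, b, c)
--
--         while True:
--             a, b, c = b, c, next(it)
--             yield (a, b, c)
--     except StopIteration:
--         pass
-- ===== SOURCE B (Python) =====
-- from itertools import tee
--
-- def triplewise(iterable):
--     a, b, c = tee(iterable, 3)
--     next(b, None)
--     next(c, None)
--     next(c, None)
--     yield from zip(a, b, c)
-- ===== Notes on version B (the rewrite author's own statement) =====
-- stated objective: idiomatic
-- what changed: Replaces the explicit three-variable rotation loop with manual StopIteration handling by the standard itertools triplewise recipe: tee the iterable into three streams, offset the second by one and the third by two with next(.., None), and zip them.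
import Mathlib
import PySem

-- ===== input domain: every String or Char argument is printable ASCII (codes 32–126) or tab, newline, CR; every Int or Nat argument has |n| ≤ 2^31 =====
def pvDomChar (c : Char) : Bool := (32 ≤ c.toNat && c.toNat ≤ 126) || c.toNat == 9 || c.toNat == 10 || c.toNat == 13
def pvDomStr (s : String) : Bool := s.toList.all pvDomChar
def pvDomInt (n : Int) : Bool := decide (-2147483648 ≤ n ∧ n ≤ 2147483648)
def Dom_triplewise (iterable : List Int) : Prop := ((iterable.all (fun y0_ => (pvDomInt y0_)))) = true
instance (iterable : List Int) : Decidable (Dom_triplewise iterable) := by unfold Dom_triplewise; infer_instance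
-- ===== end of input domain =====

-- B replaces A's explicit three-variable rotation loop by the itertools recipe:
-- tee into three offset streams (modelled by drop 1 / drop 2) zipped together. Same O(n) cost.

-- ===== PORT A =====
-- the 'while True: a,b,c = b,c,next(it)' rotation loop, yielding until the iterator is exhausted
def triplewiseLoop (b c : Int) : List Int → List (Int × Int × Int)
  | [] => []
  | x :: rest => (b, c, x) :: triplewiseLoop c x rest

def triplewise (iterable : List Int) : List (Int × Int × Int) :=
  match iterable with
  | a :: b :: c :: rest => (a, b, c) :: triplewiseLoop b c rest
  | _ => []  -- one of the three initial next(it) raised StopIteration: nothing yielded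

-- ===== PORT B =====
-- tee(iterable,3); the second stream advanced once, the third twice; zip the three
def triplewise_alt (iterable : List Int) : List (Int × Int × Int) :=
  iterable.zip ((iterable.drop 1).zip (iterable.drop 2))

-- ===== PRECONDITION & SPEC =====
def Spec_triplewise (iterable : List Int) (out : List (Int × Int × Int)) : Prop := out = triplewise_alt iterable
instance (iterable : List Int) (out : List (Int × Int × Int)) : Decidable (Spec_triplewise iterable out) := by unfold Spec_triplewise; infer_instance

-- ===== CLAIM (what is proved, stated in full; the proofs are below) =====
def Claim_equal_triplewise : Prop := ∀ (iterable : List Int), Dom_triplewise iterable → Spec_triplewise iterable (triplewise iterable)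

-- ===== LEMMAS AND PROOFS =====
theorem triplewiseLoop_eq_zip (rest : List Int) : ∀ (b c : Int),
    triplewiseLoop b c rest = (b :: c :: rest).zip ((c :: rest).zip rest) := by
  induction rest with
  | nil => intro b c; simp [triplewiseLoop]
  | cons x r ih => intro b c; rw [triplewiseLoop, ih c x]; simp [List.zip]

-- ===== VERDICT (by name: the statement is the Claim_ definition above) =====
theorem triplewise_spec : Claim_equal_triplewise := by
  intro iterable _
  unfold Spec_triplewise triplewise triplewise_alt
  match iterable with
  | [] => rfl
  | [a] => rfl
  | [a, b] => rfl
  | a :: b :: c :: rest => simp [triplewiseLoop_eq_zip, List.zip]
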